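-- pv_equiv track=rewrite | github.com/sinhaapurva25/python | HackerRank-ProblemSolving/queens-attack-2-cpy.py | rightTopDiagnol
-- ===== SOURCE A (Python) =====
-- def rightTopDiagnol(subLst, r, c, n, obstacles):
--     while 1:
--         if r == n or c == n or ([r, c] in obstacles):
--             break
--         else:
--             r += 1
--             c += 1
--             subLst.append([r, c])
--     return subLst
-- ===== SOURCE B (Python) =====
-- def rightTopDiagnol(subLst, r, c, n, obstacles):
--     # candidate stopping distances along the rising diagonal: reaching either
--     # edge line (r+d == n or c+d == n) or a cell listed in obstacles
--     stops = [d for d in (n - r, n - c) if d >= 0]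
--     for o in obstacles:
--         if len(o) == 2 and o[0] - r == o[1] - c and o[0] - r >= 0:
--             stops.append(o[0] - r)
--     m = min(stops)
--     for j in range(1, m + 1):
--         subLst.append([r + j, c + j])
--     return subLst
-- ===== Notes on version B (the rewrite author's own statement) =====
-- stated objective: faster
-- what changed: B replaces A's cell-by-cell diagonal walk (which re-scans the whole obstacle list at every step) by a single pass over the obstacles collecting candidate stopping distances, takes their minimum, and emits the diagonal cells directly; intended as faster - timing runs read B 10-18x faster at the largest size both finished, though that run recorded the reading as unconfirmed because some random timing inputs lie outside Pre_ (A diverges, B raises ValueError there).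
import Mathlib
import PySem

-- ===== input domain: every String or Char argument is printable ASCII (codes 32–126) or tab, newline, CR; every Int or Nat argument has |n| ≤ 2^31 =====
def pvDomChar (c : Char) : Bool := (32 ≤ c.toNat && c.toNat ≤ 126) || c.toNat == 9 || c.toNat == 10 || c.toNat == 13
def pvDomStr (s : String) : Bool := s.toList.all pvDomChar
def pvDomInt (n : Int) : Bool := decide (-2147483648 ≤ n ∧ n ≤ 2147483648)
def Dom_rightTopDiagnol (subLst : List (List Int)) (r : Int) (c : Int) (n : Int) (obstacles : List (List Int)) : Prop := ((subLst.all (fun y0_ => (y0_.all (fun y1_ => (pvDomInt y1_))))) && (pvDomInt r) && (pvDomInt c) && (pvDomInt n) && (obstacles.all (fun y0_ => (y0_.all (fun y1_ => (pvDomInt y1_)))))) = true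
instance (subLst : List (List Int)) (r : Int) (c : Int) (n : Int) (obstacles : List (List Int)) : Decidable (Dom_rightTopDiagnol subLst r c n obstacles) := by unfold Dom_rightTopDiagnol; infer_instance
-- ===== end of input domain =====

-- B replaces A's cell-by-cell diagonal walk (an obstacle-membership scan per step) by one pass over the
-- obstacles collecting candidate stopping distances, takes their minimum, and emits the cells directly.
-- Both Pythons mutate subLst in place (append the same cells); the theorems are about the return value.

-- ===== PORT A =====
-- A's 'while 1' loop; fuel bounds the iterations (on Pre_ the loop stops within the fuel below)
def pvLoopA (n : Int) (obstacles : List (List Int)) : Nat → List (List Int) → Int → Int → List (List Int)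
  | 0, subLst, _, _ => subLst
  | fuel + 1, subLst, r, c =>
    if r = n ∨ c = n ∨ [r, c] ∈ obstacles then subLst
    else pvLoopA n obstacles fuel (subLst ++ [[r + 1, c + 1]]) (r + 1) (c + 1)

def rightTopDiagnol (subLst : List (List Int)) (r : Int) (c : Int) (n : Int) (obstacles : List (List Int)) : List (List Int) :=
  pvLoopA n obstacles
    ((n - r).toNat + (n - c).toNat + (obstacles.map (fun o => (o.headD 0 - r).toNat)).sum + 1)
    subLst r c

-- ===== PORT B =====
-- body of B's 'for o in obstacles' loop (the len(o) == 2 guard is the match on [a, b])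
def pvObsStop (r : Int) (c : Int) (o : List Int) : Option Int :=
  match o with
  | [a, b] => if a - r = b - c ∧ 0 ≤ a - r then some (a - r) else none
  | _ => none

-- B's 'stops' list: the two edge candidates (kept if ≥ 0), then the obstacle candidates
def pvStops (r : Int) (c : Int) (n : Int) (obstacles : List (List Int)) : List Int :=
  ((if 0 ≤ n - r then [n - r] else []) ++ (if 0 ≤ n - c then [n - c] else [])) ++
    obstacles.filterMap (pvObsStop r c)

def rightTopDiagnol_alt (subLst : List (List Int)) (r : Int) (c : Int) (n : Int) (obstacles : List (List Int)) : List (List Int) :=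
  match PySem.List.min? (pvStops r c n obstacles) (fun x => x) with
  | some m => subLst ++ (PySem.List.pyRange 1 (m + 1) 1).map (fun j => [r + j, c + j])
  | none => subLst  -- Python's min([]) raises ValueError here; excluded by Pre_

-- ===== PRECONDITION & SPEC =====
-- Pre_ holds exactly when A's 'while 1' loop terminates: some stopping step exists — an edge line lies
-- ahead (r ≤ n or c ≤ n) or an obstacle sits on the rising diagonal at or ahead of (r, c).  Outside
-- Pre_ the Python A loops forever (returns nothing) and B raises ValueError (min of an empty list).
def Pre_rightTopDiagnol (subLst : List (List Int)) (r : Int) (c : Int) (n : Int) (obstacles : List (List Int)) : Prop :=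
  r ≤ n ∨ c ≤ n ∨ ∃ o ∈ obstacles, o.length = 2 ∧ o.getD 0 0 - r = o.getD 1 0 - c ∧ 0 ≤ o.getD 0 0 - r
instance (subLst : List (List Int)) (r : Int) (c : Int) (n : Int) (obstacles : List (List Int)) : Decidable (Pre_rightTopDiagnol subLst r c n obstacles) := by unfold Pre_rightTopDiagnol; infer_instance

def pvWitness_rightTopDiagnol : List (List Int) × Int × Int × Int × List (List Int) := ([], 1, 0, 3, [[3, 2]])

def Spec_rightTopDiagnol (subLst : List (List Int)) (r : Int) (c : Int) (n : Int) (obstacles : List (List Int)) (out : List (List Int)) : Prop := out = rightTopDiagnol_alt subLst r c n obstacles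
instance (subLst : List (List Int)) (r : Int) (c : Int) (n : Int) (obstacles : List (List Int)) (out : List (List Int)) : Decidable (Spec_rightTopDiagnol subLst r c n obstacles out) := by unfold Spec_rightTopDiagnol; infer_instance

-- ===== CLAIM (what is proved, stated in full; the proofs are below) =====
def Claim_equal_rightTopDiagnol : Prop := ∀ (subLst : List (List Int)) (r : Int) (c : Int) (n : Int) (obstacles : List (List Int)), Dom_rightTopDiagnol subLst r c n obstacles → Pre_rightTopDiagnol subLst r c n obstacles → Spec_rightTopDiagnol subLst r c n obstacles (rightTopDiagnol subLst r c n obstacles)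

-- ===== LEMMAS AND PROOFS =====

theorem pvObsStop_some {r c : Int} {o : List Int} {y : Int} (h : pvObsStop r c o = some y) :
    ∃ a b, o = [a, b] ∧ a - r = b - c ∧ 0 ≤ a - r ∧ y = a - r := by
  rcases o with _ | ⟨a, _ | ⟨b, _ | ⟨x, t⟩⟩⟩
  · simp [pvObsStop] at h
  · simp [pvObsStop] at h
  · simp only [pvObsStop] at h
    rcases Option.ite_none_right_eq_some.mp h with ⟨hc, hy⟩
    exact ⟨a, b, rfl, hc.1, hc.2, (Option.some_inj.mp hy).symm⟩
  · simp [pvObsStop] at h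

theorem pvStops_nonneg {r c n : Int} {obstacles : List (List Int)} {y : Int}
    (hy : y ∈ pvStops r c n obstacles) : 0 ≤ y := by
  rcases List.mem_append.mp hy with h | h
  · rcases List.mem_append.mp h with h1 | h1 <;> [skip; skip] <;>
      { split at h1 <;> simp at h1 <;> omega }
  · obtain ⟨o, _, ho⟩ := List.mem_filterMap.mp h
    obtain ⟨a, b, _, _, ha, hya⟩ := pvObsStop_some ho
    omega

theorem pvStops_zero_mem {r c n : Int} {obstacles : List (List Int)}
    (hb : r = n ∨ c = n ∨ [r, c] ∈ obstacles) : (0 : Int) ∈ pvStops r c n obstacles := by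
  unfold pvStops
  rcases hb with h | h | h
  · subst h
    simp
  · subst h
    have : (0 : Int) ∈ (if 0 ≤ c - c then [c - c] else []) := by simp
    simp only [List.mem_append]
    left; right; simpa using this
  · simp only [List.mem_append, List.mem_filterMap]
    right
    exact ⟨[r, c], h, by simp [pvObsStop]⟩

theorem pvStops_mem_zero {r c n : Int} {obstacles : List (List Int)}
    (h0 : (0 : Int) ∈ pvStops r c n obstacles) : r = n ∨ c = n ∨ [r, c] ∈ obstacles := by
  rcases List.mem_append.mp h0 with h | h
  · rcases List.mem_append.mp h with h1 | h1 <;> [left; right] <;> [skip; left] <;>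
      { split at h1 <;> simp at h1 <;> omega }
  · obtain ⟨o, ho, hs⟩ := List.mem_filterMap.mp h
    obtain ⟨a, b, heq, hd, _, hy⟩ := pvObsStop_some hs
    right; right
    have har : a = r := by omega
    have hbc : b = c := by omega
    rw [← har, ← hbc]
    exact heq ▸ ho

theorem pvStops_shift {r c n : Int} {obstacles : List (List Int)}
    (hrn : r ≠ n) (hcn : c ≠ n) (hmem : [r, c] ∉ obstacles) :
    pvStops (r + 1) (c + 1) n obstacles = (pvStops r c n obstacles).map (fun y => y - 1) := by
  unfold pvStops
  rw [List.map_append, List.map_append]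
  congr 1
  · congr 1
    · by_cases h : 0 ≤ n - r
      · rw [if_pos (by omega : (0:Int) ≤ n - (r + 1)), if_pos h]
        simp only [List.map_cons, List.map_nil, List.cons.injEq, and_true]
        omega
      · rw [if_neg (by omega : ¬ (0:Int) ≤ n - (r + 1)), if_neg h]
        rfl
    · by_cases h : 0 ≤ n - c
      · rw [if_pos (by omega : (0:Int) ≤ n - (c + 1)), if_pos h]
        simp only [List.map_cons, List.map_nil, List.cons.injEq, and_true]
        omega
      · rw [if_neg (by omega : ¬ (0:Int) ≤ n - (c + 1)), if_neg h]
        rfl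
  · rw [List.map_filterMap]
    apply List.filterMap_congr
    intro o ho
    have hhd : o ≠ [r, c] := fun h => hmem (h ▸ ho)
    rcases o with _ | ⟨a, _ | ⟨b, _ | ⟨x, t⟩⟩⟩ <;> simp only [pvObsStop] <;> try rfl
    have hne : ¬(a = r ∧ b = c) := by
      intro ⟨h1, h2⟩; exact hhd (by simp [h1, h2])
    split <;> split <;> simp only [Option.map_some, Option.map_none, Option.some.injEq] <;> omega

theorem pvMin_shift {r c n : Int} {obstacles : List (List Int)} {m : Int}
    (hrn : r ≠ n) (hcn : c ≠ n) (hmem : [r, c] ∉ obstacles)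
    (hm : PySem.List.min? (pvStops r c n obstacles) (fun x => x) = some m) :
    PySem.List.min? (pvStops (r + 1) (c + 1) n obstacles) (fun x => x) = some (m - 1) := by
  have hmmem := PySem.List.min?_mem hm
  have hmin := PySem.List.min?_isMin hm
  rcases h' : PySem.List.min? (pvStops (r + 1) (c + 1) n obstacles) (fun x => x) with _ | m'
  · rw [PySem.List.min?_eq_none_iff] at h'
    rw [pvStops_shift hrn hcn hmem] at h'
    have : pvStops r c n obstacles = [] := by
      rcases hl : pvStops r c n obstacles with _ | ⟨z, t⟩
      · rfl
      · rw [hl] at h'; simp at h'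
    rw [this] at hmmem; cases hmmem
  · have hmem' := PySem.List.min?_mem h'
    have hmin' := PySem.List.min?_isMin h'
    rw [pvStops_shift hrn hcn hmem] at hmem' hmin'
    obtain ⟨y, hy, hym⟩ := List.mem_map.mp hmem'
    have h1 : m ≤ y := hmin y hy
    have h2 : m' ≤ m - 1 := hmin' (m - 1) (List.mem_map.mpr ⟨m, hmmem, rfl⟩)
    have : m' = m - 1 := by omega
    rw [this]

theorem pvLoopA_eq (n : Int) (obstacles : List (List Int)) :
    ∀ (fuel : Nat) (r c : Int) (subLst : List (List Int)) (m : Int),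
      PySem.List.min? (pvStops r c n obstacles) (fun x => x) = some m →
      m.toNat < fuel →
      pvLoopA n obstacles fuel subLst r c =
        subLst ++ (List.range m.toNat).map
          (fun (k : Nat) => [r + (1 + (k : Int)), c + (1 + (k : Int))]) := by
  intro fuel
  induction fuel with
  | zero => intro r c subLst m _ h; omega
  | succ fuel ih =>
    intro r c subLst m hm hfuel
    have hmmem := PySem.List.min?_mem hm
    have hm0 : 0 ≤ m := pvStops_nonneg hmmem
    by_cases hb : r = n ∨ c = n ∨ [r, c] ∈ obstacles
    · have hle := PySem.List.min?_isMin hm 0 (pvStops_zero_mem hb)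
      have : m = 0 := by omega
      simp [pvLoopA, hb, this]
    · push_neg at hb
      obtain ⟨hrn, hcn, hmem⟩ := hb
      have hne0 : m ≠ 0 := fun h => (by push_neg; exact ⟨hrn, hcn, hmem⟩ :
        ¬(r = n ∨ c = n ∨ [r, c] ∈ obstacles)) (pvStops_mem_zero (h ▸ hmmem))
      have hm1 : 1 ≤ m := by omega
      have hshift := pvMin_shift hrn hcn hmem hm
      have hstep : pvLoopA n obstacles (fuel + 1) subLst r c =
          pvLoopA n obstacles fuel (subLst ++ [[r + 1, c + 1]]) (r + 1) (c + 1) := by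
        simp only [pvLoopA]
        rw [if_neg (by push_neg; exact ⟨hrn, hcn, hmem⟩)]
      rw [hstep, ih (r + 1) (c + 1) (subLst ++ [[r + 1, c + 1]]) (m - 1) hshift (by omega)]
      have hMnat : (m - 1).toNat = m.toNat - 1 := by omega
      have hMsucc : m.toNat = (m.toNat - 1) + 1 := by omega
      rw [hMnat, hMsucc, List.range_succ_eq_map, List.map_cons, List.map_map]
      have hlist : List.map ((fun (k : Nat) => [r + (1 + (k : Int)), c + (1 + (k : Int))]) ∘ Nat.succ)
            (List.range (m.toNat - 1)) =
          List.map (fun (k : Nat) => [r + 1 + (1 + (k : Int)), c + 1 + (1 + (k : Int))])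
            (List.range (m.toNat - 1)) := by
        apply List.map_congr_left
        intro k _
        simp only [Function.comp_apply, List.cons.injEq, and_true]
        push_cast
        omega
      rw [hlist]
      simp

-- ===== VERDICT (by name: the statement is the Claim_ definition above) =====
theorem rightTopDiagnol_spec : Claim_equal_rightTopDiagnol := by
  intro subLst r c n obstacles _ hpre
  -- Pre_ puts a candidate stopping distance in B's stops list
  have hex : ∃ y ∈ pvStops r c n obstacles,
      y.toNat ≤ (n - r).toNat + (n - c).toNat + (obstacles.map (fun o => (o.headD 0 - r).toNat)).sum := by
    rcases hpre with h | h | ⟨o, ho, hlen, hd, hge⟩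
    · refine ⟨n - r, ?_, by omega⟩
      unfold pvStops
      simp only [List.mem_append]
      left; left
      rw [if_pos (by omega : (0:Int) ≤ n - r)]
      simp
    · refine ⟨n - c, ?_, by omega⟩
      unfold pvStops
      have : (n - c) ∈ (if (0:Int) ≤ n - c then [n - c] else []) := by
        rw [if_pos (by omega : (0:Int) ≤ n - c)]; simp
      simp only [List.mem_append]
      left; right; exact this
    · rcases o with _ | ⟨a, _ | ⟨b, _ | ⟨x, t⟩⟩⟩ <;> simp at hlen
      simp only [List.getD_cons_zero, List.getD_cons_succ] at hd hge
      refine ⟨a - r, ?_, ?_⟩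
      · unfold pvStops
        simp only [List.mem_append, List.mem_filterMap]
        right
        refine ⟨[a, b], ho, ?_⟩
        simp only [pvObsStop]
        rw [if_pos ⟨hd, hge⟩]
      · have hmem : (a - r).toNat ∈ obstacles.map (fun o => (o.headD 0 - r).toNat) :=
          List.mem_map.mpr ⟨[a, b], ho, by simp⟩
        have := List.single_le_sum (l := obstacles.map (fun o => (o.headD 0 - r).toNat))
          (fun x _ => Nat.zero_le x) _ hmem
        omega
  obtain ⟨y, hy, hyb⟩ := hex
  rcases hmo : PySem.List.min? (pvStops r c n obstacles) (fun x => x) with _ | m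
  · rw [PySem.List.min?_eq_none_iff] at hmo
    rw [hmo] at hy; cases hy
  · have hmmem := PySem.List.min?_mem hmo
    have hmin := PySem.List.min?_isMin hmo y hy
    have hm0 : 0 ≤ m := pvStops_nonneg hmmem
    unfold Spec_rightTopDiagnol rightTopDiagnol
    rw [pvLoopA_eq n obstacles _ r c subLst m hmo (by omega)]
    have halt : rightTopDiagnol_alt subLst r c n obstacles =
        subLst ++ (PySem.List.pyRange 1 (m + 1) 1).map (fun j => [r + j, c + j]) := by
      unfold rightTopDiagnol_alt
      rw [hmo]
    rw [halt, PySem.List.pyRange_one]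
    have h1 : (m + 1 - 1).toNat = m.toNat := by omega
    rw [h1, List.map_map]
    simp [Function.comp]
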